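-- pv_equiv track=rewrite | github.com/Kinrokin/kings-theorem | scripts/ci_bias_invariants.py | extract_traditions
-- ===== SOURCE A (Python) =====
-- def extract_traditions(text: str) -> int:
--     traditions = {"christian", "islamic", "hindu", "secular", "buddhist", "jewish"}
--     found = set()
--     for line in text.lower().splitlines():
--         for t in traditions:
--             if t in line:
--                 found.add(t)
--     return len(found)
-- ===== SOURCE B (Python) =====
-- def extract_traditions(text: str) -> int:
--     traditions = ("christian", "islamic", "hindu", "secular", "buddhist", "jewish")
--     low = text.lower()
--     n = 0
--     for t in traditions:
--         if t in low:
--             n += 1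
--     return n
-- ===== Notes on version B (the rewrite author's own statement) =====
-- stated objective: simpler
-- what changed: B drops the line loop and the dedup set: since no tradition contains a line break, it checks each tradition once against the whole lowercased text and counts the hits.
import Mathlib
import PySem

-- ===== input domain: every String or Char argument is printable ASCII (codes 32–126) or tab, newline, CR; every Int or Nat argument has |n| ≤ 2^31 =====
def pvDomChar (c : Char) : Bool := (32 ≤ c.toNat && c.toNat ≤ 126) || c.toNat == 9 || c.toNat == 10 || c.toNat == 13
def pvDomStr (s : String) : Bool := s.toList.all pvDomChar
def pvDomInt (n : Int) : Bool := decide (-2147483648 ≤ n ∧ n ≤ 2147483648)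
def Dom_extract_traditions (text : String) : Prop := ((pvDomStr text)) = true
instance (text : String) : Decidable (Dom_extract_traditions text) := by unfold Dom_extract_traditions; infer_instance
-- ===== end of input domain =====

-- B drops A's line loop and dedup set: no tradition contains a line break, so each
-- tradition is checked once against the whole lowercased text (objective: simpler).

-- ===== PORT A =====
def pvTraditions : List String := ["christian", "islamic", "hindu", "secular", "buddhist", "jewish"]

def extract_traditions (text : String) : Int :=
  let found : PySem.Set String :=
    (PySem.Str.splitlines (PySem.Str.lower text)).foldl
      (fun found line =>
        pvTraditions.foldl
          (fun f t => if PySem.Str.isIn t line then PySem.Set.add f t else f) found)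
      PySem.Set.empty
  PySem.Set.len found

-- ===== PORT B =====
def extract_traditions_alt (text : String) : Int :=
  let low := PySem.Str.lower text
  pvTraditions.foldl (fun n t => if PySem.Str.isIn t low then n + 1 else n) 0

-- ===== PRECONDITION & SPEC =====
def Spec_extract_traditions (text : String) (out : Int) : Prop := out = extract_traditions_alt text
instance (text : String) (out : Int) : Decidable (Spec_extract_traditions text out) := by unfold Spec_extract_traditions; infer_instance

-- ===== CLAIM (what is proved, stated in full; the proofs are below) =====
def Claim_equal_extract_traditions : Prop := ∀ (text : String), Dom_extract_traditions text → Spec_extract_traditions text (extract_traditions text)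

-- ===== LEMMAS AND PROOFS =====
theorem pv_prefix_append_cons {sub L ys : List Char} {c : Char} (hc : c ∉ sub)
    (h : sub <+: (L ++ c :: ys)) : sub <+: L := by
  induction sub generalizing L with
  | nil => exact List.nil_prefix
  | cons a sub ih =>
    cases L with
    | nil =>
      rcases h with ⟨t, ht⟩
      simp only [List.cons_append, List.nil_append, List.cons.injEq] at ht
      exact absurd (ht.1 ▸ List.mem_cons_self ..) hc
    | cons b L =>
      rcases h with ⟨t, ht⟩
      simp only [List.cons_append, List.cons.injEq] at ht
      obtain ⟨rfl, ht⟩ := ht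
      exact List.cons_prefix_cons.mpr ⟨rfl, ih (fun hm => hc (List.mem_cons_of_mem _ hm)) ⟨t, ht⟩⟩

theorem pv_infix_append_cons {sub L ys : List Char} {c : Char} (hc : c ∉ sub) (hne : sub ≠ []) :
    sub <:+: (L ++ c :: ys) ↔ sub <:+: L ∨ sub <:+: ys := by
  induction L with
  | nil =>
    simp only [List.nil_append]
    rw [List.infix_cons_iff]
    constructor
    · rintro (h | h)
      · cases sub with
        | nil => exact absurd rfl hne
        | cons a s =>
          rcases h with ⟨t, ht⟩
          simp only [List.cons_append, List.cons.injEq] at ht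
          exact absurd (ht.1 ▸ List.mem_cons_self ..) hc
      · exact Or.inr h
    · rintro (h | h)
      · exact absurd (List.infix_nil.mp h) hne
      · exact Or.inr h
  | cons b L ih =>
    rw [List.cons_append, List.infix_cons_iff, List.infix_cons_iff, ih]
    constructor
    · rintro (h | h | h)
      · exact Or.inl (Or.inl (pv_prefix_append_cons hc (by simpa using h)))
      · exact Or.inl (Or.inr h)
      · exact Or.inr h
    · rintro (⟨h | h⟩ | h)
      · exact Or.inl (h.trans (List.prefix_append _ _))
      · exact Or.inr (Or.inl h)
      · exact Or.inr (Or.inr h)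


def pvIsB (c : Char) : Bool :=
  decide (c.toNat = 10) || decide (c.toNat = 13) || decide (c.toNat = 11) || decide (c.toNat = 12) ||
    decide (c.toNat = 28) || decide (c.toNat = 29) || decide (c.toNat = 30) ||
    decide (c.toNat = 133) || decide (c.toNat = 8232) || decide (c.toNat = 8233)

theorem pv_splitlines_eq_go (s : List Char) :
    PySem.Chars.splitlines s = PySem.Chars.splitlines.go pvIsB s [] [] := rfl

theorem pv_go_infix (isB : Char → Bool) (sub : List Char) (hne : sub ≠ [])
    (hs : ∀ c ∈ sub, isB c = false) (hr : isB '\r' = true) (hn : isB '\n' = true) :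
    ∀ s cur acc, (∃ l ∈ PySem.Chars.splitlines.go isB s cur acc, sub <:+: l) ↔
      ((∃ l ∈ acc, sub <:+: l) ∨ sub <:+: (cur.reverse ++ s)) := by
  have hrm : '\r' ∉ sub := fun hm => by simp [hs _ hm] at hr
  have hnm : '\n' ∉ sub := fun hm => by simp [hs _ hm] at hn
  intro s cur acc
  induction s, cur, acc using PySem.Chars.splitlines.go.induct isB with
  | case1 cur acc h =>
    rw [List.isEmpty_iff] at h
    subst h
    simp [PySem.Chars.splitlines.go, List.infix_nil, hne]
  | case2 cur acc h =>
    simp [PySem.Chars.splitlines.go, h, or_comm]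
  | case3 rest cur acc ih =>
    rw [show PySem.Chars.splitlines.go isB ('\r'::'\n'::rest) cur acc =
        PySem.Chars.splitlines.go isB rest [] (cur.reverse :: acc) by
      simp [PySem.Chars.splitlines.go]]
    rw [ih, pv_infix_append_cons hrm hne,
      show ('\n'::rest : List Char) = [] ++ '\n'::rest from rfl, pv_infix_append_cons hnm hne]
    simp [List.infix_nil, hne]
    rw [or_assoc]
    exact or_left_comm
  | case4 c rest cur acc hpat hc ih =>
    have hcm : c ∉ sub := fun hm => by simp [hs _ hm] at hc
    rw [show PySem.Chars.splitlines.go isB (c::rest) cur acc =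
        PySem.Chars.splitlines.go isB rest [] (cur.reverse :: acc) by
      rw [PySem.Chars.splitlines.go.eq_def]
      split
      · next heq => simp at heq
      · next rest1 heq =>
        cases heq
        exact (hpat _ rfl rfl).elim
      · next c1 rest1 heq =>
        cases heq
        simp [hc]]
    rw [ih, pv_infix_append_cons hcm hne]
    simp
    rw [or_assoc]
    exact or_left_comm
  | case5 c rest cur acc hpat hc ih =>
    rw [show PySem.Chars.splitlines.go isB (c::rest) cur acc =
        PySem.Chars.splitlines.go isB rest (c :: cur) acc by
      rw [PySem.Chars.splitlines.go.eq_def]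
      split
      · next heq => simp at heq
      · next rest1 heq =>
        cases heq
        exact (hpat _ rfl rfl).elim
      · next c1 rest1 heq =>
        cases heq
        simp [hc]]
    rw [ih]
    simp

theorem pv_splitlines_infix (sub s : List Char) (hne : sub ≠ [])
    (hs : ∀ c ∈ sub, pvIsB c = false) :
    (∃ l ∈ PySem.Chars.splitlines s, sub <:+: l) ↔ sub <:+: s := by
  rw [pv_splitlines_eq_go,
    pv_go_infix pvIsB sub hne hs (by decide) (by decide) s [] []]
  simp

theorem pv_mem_inner (line : String) (ts : List String) (f : PySem.Set String) (x : String) :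
    x ∈ ts.foldl (fun f t => if PySem.Str.isIn t line then PySem.Set.add f t else f) f ↔
      x ∈ f ∨ (x ∈ ts ∧ PySem.Str.isIn x line = true) := by
  induction ts generalizing f with
  | nil => simp
  | cons t ts ih =>
    simp only [List.foldl_cons, ih]
    by_cases h : PySem.Str.isIn t line = true
    · rw [if_pos h]
      simp only [PySem.Set.mem_add, List.mem_cons]
      constructor
      · rintro (⟨h1 | rfl⟩ | ⟨h1, h2⟩)
        · tauto
        · exact Or.inr ⟨Or.inl rfl, h⟩
        · tauto
      · rintro (h1 | ⟨(rfl | h1), h2⟩) <;> tauto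
    · rw [if_neg h]
      simp only [List.mem_cons]
      constructor
      · rintro (h1 | ⟨h1, h2⟩) <;> tauto
      · rintro (h1 | ⟨(rfl | h1), h2⟩)
        · tauto
        · exact absurd h2 h
        · tauto

theorem pv_nodup_inner (line : String) (ts : List String) (f : PySem.Set String) (hf : f.Nodup) :
    (ts.foldl (fun f t => if PySem.Str.isIn t line then PySem.Set.add f t else f) f).Nodup := by
  induction ts generalizing f with
  | nil => exact hf
  | cons t ts ih =>
    simp only [List.foldl_cons]
    by_cases h : PySem.Str.isIn t line = true
    · rw [if_pos h]
      exact ih _ (PySem.Set.nodup_add _ _ hf)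
    · rw [if_neg h]
      exact ih _ hf

theorem pv_mem_outer (lines : List String) (f : PySem.Set String) (x : String) :
    x ∈ lines.foldl (fun f line => pvTraditions.foldl
        (fun f t => if PySem.Str.isIn t line then PySem.Set.add f t else f) f) f ↔
      x ∈ f ∨ (x ∈ pvTraditions ∧ ∃ l ∈ lines, PySem.Str.isIn x l = true) := by
  induction lines generalizing f with
  | nil => simp
  | cons line lines ih =>
    simp only [List.foldl_cons, ih, pv_mem_inner, List.mem_cons]
    constructor
    · rintro (⟨h1 | ⟨h1, h2⟩⟩ | ⟨h1, l, hl, h2⟩)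
      · tauto
      · exact Or.inr ⟨h1, line, Or.inl rfl, h2⟩
      · exact Or.inr ⟨h1, l, Or.inr hl, h2⟩
    · rintro (h1 | ⟨h1, l, (rfl | hl), h2⟩)
      · tauto
      · exact Or.inl (Or.inr ⟨h1, h2⟩)
      · exact Or.inr ⟨h1, l, hl, h2⟩

theorem pv_nodup_outer (lines : List String) (f : PySem.Set String) (hf : f.Nodup) :
    (lines.foldl (fun f line => pvTraditions.foldl
        (fun f t => if PySem.Str.isIn t line then PySem.Set.add f t else f) f) f).Nodup := by
  induction lines generalizing f with
  | nil => exact hf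
  | cons line lines ih => exact ih _ (pv_nodup_inner _ _ _ hf)

theorem pv_foldl_count (q : String → Bool) (ts : List String) (n : Int) :
    ts.foldl (fun n t => if q t then n + 1 else n) n = n + (ts.countP q : Int) := by
  induction ts generalizing n with
  | nil => simp
  | cons t ts ih =>
    by_cases h : q t = true
    · simp [h, ih]
      ring
    · simp [h, ih]

theorem pv_ok : pvTraditions.all (fun t => !t.toList.isEmpty && t.toList.all (fun c => !pvIsB c)) = true := by rfl

theorem pv_traditions_ok : ∀ t ∈ pvTraditions, t.toList ≠ [] ∧ ∀ c ∈ t.toList, pvIsB c = false := by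
  have h := pv_ok
  simp only [List.all_eq_true, Bool.and_eq_true, Bool.not_eq_true'] at h
  intro t ht
  exact ⟨List.isEmpty_eq_false_iff.mp (h t ht).1, (h t ht).2⟩

theorem pv_line_exists_iff (t low : String) (ht : t ∈ pvTraditions) :
    (∃ l ∈ PySem.Str.splitlines low, PySem.Str.isIn t l = true) ↔ PySem.Str.isIn t low = true := by
  obtain ⟨hne, hs⟩ := pv_traditions_ok t ht
  rw [PySem.Str.isIn_iff_infix, ← pv_splitlines_infix _ _ hne hs]
  constructor
  · rintro ⟨l, hl, h⟩
    refine ⟨l.toList, ?_, (PySem.Str.isIn_iff_infix ..).mp h⟩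
    rw [← PySem.Str.splitlines_map_toList]
    exact List.mem_map_of_mem hl
  · rintro ⟨cl, hcl, h⟩
    rw [← PySem.Str.splitlines_map_toList] at hcl
    rcases List.mem_map.mp hcl with ⟨l, hl, rfl⟩
    exact ⟨l, hl, (PySem.Str.isIn_iff_infix ..).mpr h⟩

theorem pv_nodup_traditions : pvTraditions.Nodup := by decide

theorem pv_main (text : String) : extract_traditions text = extract_traditions_alt text := by
  simp only [extract_traditions, extract_traditions_alt]
  rw [pv_foldl_count]
  set low := PySem.Str.lower text with hlow
  set found := (PySem.Str.splitlines low).foldl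
      (fun found line =>
        pvTraditions.foldl
          (fun f t => if PySem.Str.isIn t line then PySem.Set.add f t else f) found)
      PySem.Set.empty with hfound
  have hmem : ∀ x, x ∈ found ↔ x ∈ pvTraditions.filter (fun t => PySem.Str.isIn t low) := by
    intro x
    rw [hfound, pv_mem_outer, List.mem_filter]
    constructor
    · rintro (h | ⟨h1, h2⟩)
      · exact absurd h (by simp [PySem.Set.empty])
      · exact ⟨h1, (pv_line_exists_iff x low h1).mp h2⟩
    · rintro ⟨h1, h2⟩
      exact Or.inr ⟨h1, (pv_line_exists_iff x low h1).mpr h2⟩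
  have hnodup : found.Nodup := pv_nodup_outer _ _ (by simp [PySem.Set.empty])
  have hperm : found.Perm (pvTraditions.filter (fun t => PySem.Str.isIn t low)) :=
    (List.perm_ext_iff_of_nodup hnodup (pv_nodup_traditions.filter _)).mpr hmem
  have hlen : found.length = pvTraditions.countP (fun t => PySem.Str.isIn t low) := by
    rw [hperm.length_eq, ← List.countP_eq_length_filter]
  show PySem.Set.len found = _
  simp [PySem.Set.len, hlen]

-- ===== VERDICT (by name: the statement is the Claim_ definition above) =====
theorem extract_traditions_spec : Claim_equal_extract_traditions := by
  intro text _
  exact pv_main text
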